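-- pv_equiv track=rewrite | github.com/jingyu525/markdown-to-wechat | src/markdown_to_wechat/converter.py | _split_table_row
-- ===== SOURCE A (Python) =====
-- def _split_table_row(row: str) -> list:
--     """
--     Split a table row into cells, handling escaped pipe characters.
--
--     Args:
--         row: Table row string starting and ending with |
--
--     Returns:
--         List of cell contents
--     """
--     cells = []
--     current_cell = ""
--     i = 1
--     end = len(row) - 1
--
--     while i < end:
--         char = row[i]
--         if char == '\\' and i + 1 < end and row[i + 1] == '|':
--             current_cell += '|'
--             i += 2
--             continue
--         elif char == '|':
--             cells.append(current_cell.strip())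
--             current_cell = ""
--         else:
--             current_cell += char
--         i += 1
--
--     if current_cell or cells:
--         cells.append(current_cell.strip())
--
--     return cells
-- ===== SOURCE B (Python) =====
-- def _split_table_row(row: str) -> list:
--     content = row[1:-1]
--     if not content:
--         return []
--     return [cell.replace('\x00', '|').strip()
--             for cell in content.replace('\\|', '\x00').split('|')]
-- ===== Notes on version B (the rewrite author's own statement) =====
-- stated objective: faster
-- what changed: Replaced A's index-based per-character state machine (manual lookahead, cell accumulator) with three bulk string passes: replace escaped pipes with a sentinel, split on the remaining pipes, then restore the sentinel and strip each cell.
import Mathlib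
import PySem

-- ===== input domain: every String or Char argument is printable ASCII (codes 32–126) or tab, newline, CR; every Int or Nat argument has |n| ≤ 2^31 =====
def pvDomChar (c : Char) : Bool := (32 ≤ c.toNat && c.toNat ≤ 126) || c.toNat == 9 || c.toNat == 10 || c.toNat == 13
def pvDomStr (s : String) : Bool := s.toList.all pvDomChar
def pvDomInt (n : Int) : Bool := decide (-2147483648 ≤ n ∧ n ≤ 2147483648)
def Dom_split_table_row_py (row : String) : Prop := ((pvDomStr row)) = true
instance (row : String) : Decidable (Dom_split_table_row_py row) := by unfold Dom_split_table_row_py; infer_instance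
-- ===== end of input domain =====

-- B replaces A's per-character state machine by bulk replace/split/strip string passes
-- (measured faster in Python by a constant factor; B uses '\x00' as sentinel, which Dom excludes from inputs).

-- ===== PORT A =====
-- A's while loop over indices 1..len-2 reads exactly the characters of row[1:-1];
-- it is transliterated as a recursion over that character list with the same
-- (current_cell, cells) state and the same branch order ('\' lookahead, '|', other).
def pvALoop (l : List Char) (cur : String) (cells : List String) : List String :=
  match l with
  | [] => if cur ≠ "" ∨ cells ≠ [] then cells ++ [PySem.Str.strip cur] else cells
  | c :: rest =>
    if c = '\\' ∧ rest.head? = some '|' then pvALoop rest.tail (cur.push '|') cells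
    else if c = '|' then pvALoop rest "" (cells ++ [PySem.Str.strip cur])
    else pvALoop rest (cur.push c) cells
termination_by l.length
decreasing_by all_goals (simp [List.length_tail]; try omega)

def split_table_row_py (row : String) : List String :=
  pvALoop (PySem.List.slice row.toList (some 1) (some (-1))) "" []

-- ===== PORT B =====
def split_table_row_py_alt (row : String) : List String :=
  let content := PySem.Str.slice row (some 1) (some (-1))
  if content = "" then []
  else
    (PySem.Chars.splitOn (PySem.Chars.replace content.toList ['\\', '|'] ['\x00']) ['|']).map
      (fun cell => PySem.Str.strip (String.ofList (PySem.Chars.replace cell ['\x00'] ['|'])))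

-- ===== PRECONDITION & SPEC =====
def Spec_split_table_row_py (row : String) (out : List String) : Prop := out = split_table_row_py_alt row
instance (row : String) (out : List String) : Decidable (Spec_split_table_row_py row out) := by unfold Spec_split_table_row_py; infer_instance

-- ===== CLAIM (what is proved, stated in full; the proofs are below) =====
def Claim_equal_split_table_row_py : Prop := ∀ (row : String), Dom_split_table_row_py row → Spec_split_table_row_py row (split_table_row_py row)

-- ===== LEMMAS AND PROOFS =====

-- specification of Chars.replace with pattern "\|" -> "\x00"
def pvR : List Char → List Char
  | [] => []
  | c :: t => if c = '\\' ∧ t.head? = some '|' then '\x00' :: pvR t.tail else c :: pvR t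
termination_by l => l.length
decreasing_by all_goals (simp [List.length_tail]; try omega)

-- specification of Chars.replace with pattern "\x00" -> "|"
def pvU (l : List Char) : List Char := l.map (fun c => if c = '\x00' then '|' else c)

-- specification of Chars.splitOn with separator "|"
def pvSP : List Char → List (List Char)
  | [] => [[]]
  | c :: t => if c = '|' then [] :: pvSP t else (pvSP t).modifyHead (c :: ·)

def pvConsHead (p : List Char) (ls : List (List Char)) : List (List Char) :=
  (p ++ ls.headI) :: ls.tail

def pvF (cell : List Char) : String :=
  PySem.Str.strip (String.ofList (pvU cell))

lemma pvRep_go (old new : List Char) (hold : old ≠ []) (spec : List Char → List Char)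
    (h2 : ∀ c t, old.isPrefixOf (c :: t) = true →
          spec (c :: t) = new ++ spec (List.drop old.length (c :: t)))
    (h3 : ∀ c t, ¬ old.isPrefixOf (c :: t) = true → spec (c :: t) = c :: spec t)
    (h1 : spec [] = []) :
    ∀ fuel l acc, l.length ≤ fuel →
      PySem.Chars.replace.go old new fuel l acc = acc.reverse ++ spec l := by
  intro fuel
  induction fuel with
  | zero =>
    intro l acc h
    have hl : l = [] := List.length_eq_zero_iff.mp (Nat.le_zero.mp h)
    subst hl
    simp [PySem.Chars.replace.go, h1]
  | succ n ih =>
    intro l acc h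
    cases l with
    | nil => simp [PySem.Chars.replace.go, h1]
    | cons c t =>
      by_cases hp : old.isPrefixOf (c :: t) = true
      · have hlen : (List.drop old.length (c :: t)).length ≤ n := by
          have : 1 ≤ old.length := List.length_pos_iff.mpr hold
          simp at h ⊢
          omega
        rw [show PySem.Chars.replace.go old new (n+1) (c :: t) acc
              = PySem.Chars.replace.go old new n (List.drop old.length (c :: t)) (new.reverse ++ acc) from by
            simp [PySem.Chars.replace.go, hp]]
        rw [ih _ _ hlen, h2 c t hp]
        simp
      · have hlen : t.length ≤ n := by simp at h; omega
        rw [show PySem.Chars.replace.go old new (n+1) (c :: t) acc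
              = PySem.Chars.replace.go old new n t (c :: acc) from by
            simp [PySem.Chars.replace.go, hp]]
        rw [ih _ _ hlen, h3 c t hp]
        simp

lemma pvR_eq (l : List Char) : PySem.Chars.replace l ['\\', '|'] ['\x00'] = pvR l := by
  have := pvRep_go ['\\', '|'] ['\x00'] (by simp) pvR
    (by
      intro c t hp
      cases t with
      | nil => simp [List.isPrefixOf] at hp
      | cons c2 t2 =>
        simp [List.isPrefixOf] at hp
        obtain ⟨rfl, rfl⟩ := hp
        simp [pvR])
    (by
      intro c t hp
      rw [pvR, if_neg]
      intro hcond
      obtain ⟨hc, hh⟩ := hcond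
      subst hc
      cases t with
      | nil => simp at hh
      | cons c2 t2 =>
        simp at hh
        subst hh
        exact hp (by simp [List.isPrefixOf]))
    (by simp [pvR])
    l.length l [] le_rfl
  simpa [PySem.Chars.replace] using this

lemma pvU_eq (l : List Char) : PySem.Chars.replace l ['\x00'] ['|'] = pvU l := by
  have := pvRep_go ['\x00'] ['|'] (by simp) pvU
    (by
      intro c t hp
      simp [List.isPrefixOf] at hp
      subst hp
      simp [pvU])
    (by
      intro c t hp
      simp [List.isPrefixOf] at hp
      have hc : c ≠ '\x00' := fun h => hp h.symm
      simp [pvU, hc])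
    (by simp [pvU])
    l.length l [] le_rfl
  simpa [PySem.Chars.replace] using this

lemma pvSP_ne_nil (l : List Char) : pvSP l ≠ [] := by
  induction l with
  | nil => simp [pvSP]
  | cons c t ih =>
    simp only [pvSP]
    split_ifs
    · simp
    · cases htl : pvSP t with
      | nil => exact absurd htl ih
      | cons hh tt => simp [List.modifyHead]

lemma pvConsHead_nil (ls : List (List Char)) (h : ls ≠ []) : pvConsHead [] ls = ls := by
  cases ls with
  | nil => exact absurd rfl h
  | cons a r => simp [pvConsHead]

lemma pvSP_go : ∀ fuel (l cur : List Char) acc, l.length ≤ fuel →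
    PySem.Chars.splitOn.go ['|'] fuel l cur acc = acc.reverse ++ pvConsHead cur.reverse (pvSP l) := by
  intro fuel
  induction fuel with
  | zero =>
    intro l cur acc h
    have hl : l = [] := List.length_eq_zero_iff.mp (Nat.le_zero.mp h)
    subst hl
    simp [PySem.Chars.splitOn.go, pvSP, pvConsHead]
  | succ n ih =>
    intro l cur acc h
    cases l with
    | nil => simp [PySem.Chars.splitOn.go, pvSP, pvConsHead]
    | cons c t =>
      by_cases hp : c = '|'
      · subst hp
        rw [show PySem.Chars.splitOn.go ['|'] (n+1) ('|' :: t) cur acc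
              = PySem.Chars.splitOn.go ['|'] n t [] (cur.reverse :: acc) from by
            simp [PySem.Chars.splitOn.go, List.isPrefixOf]]
        rw [ih _ _ _ (by simp at h; omega)]
        simp only [List.reverse_nil, pvConsHead_nil _ (pvSP_ne_nil t)]
        simp [pvSP, pvConsHead]
      · rw [show PySem.Chars.splitOn.go ['|'] (n+1) (c :: t) cur acc
              = PySem.Chars.splitOn.go ['|'] n t (c :: cur) acc from by
            have hp' : ¬('|' = c) := fun hx => hp hx.symm
            simp [PySem.Chars.splitOn.go, List.isPrefixOf, hp']]
        rw [ih _ _ _ (by simp at h; omega)]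
        cases htl : pvSP t with
        | nil => exact absurd htl (pvSP_ne_nil t)
        | cons hh tt => simp [pvSP, pvConsHead, hp, htl, List.modifyHead]

lemma pvSP_eq (l : List Char) : PySem.Chars.splitOn l ['|'] = pvSP l := by
  rw [PySem.Chars.splitOn, pvSP_go (l.length + 1) l [] [] (by omega)]
  simp [pvConsHead_nil _ (pvSP_ne_nil l)]

lemma pvSP_append (a l : List Char) (ha : '|' ∉ a) : pvSP (a ++ l) = pvConsHead a (pvSP l) := by
  induction a with
  | nil => simp [pvConsHead_nil _ (pvSP_ne_nil l)]
  | cons c a' ih =>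
    have hc : c ≠ '|' := by intro h; exact ha (by simp [h])
    have ha' : '|' ∉ a' := fun h => ha (List.mem_cons_of_mem _ h)
    simp only [List.cons_append, pvSP, if_neg hc, ih ha']
    simp [pvConsHead, List.modifyHead]

lemma pvPush (l : List Char) (c : Char) :
    (String.ofList l).push c = String.ofList (l ++ [c]) := by
  rw [String.ofList_append]; rfl

lemma pvU_append (a b : List Char) : pvU (a ++ b) = pvU a ++ pvU b := by
  simp [pvU]

lemma pvSP_no_pipe (a : List Char) (ha : '|' ∉ a) : pvSP a = [a] := by
  have := pvSP_append a [] ha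
  simpa [pvSP, pvConsHead] using this

lemma pvBase (a : List Char) (cells : List String) (ha : '|' ∉ a)
    (hne : a ≠ [] ∨ cells ≠ []) :
    pvALoop [] (String.ofList (pvU a)) cells = cells ++ (pvSP a).map pvF := by
  rw [pvALoop, if_pos, pvSP_no_pipe a ha]
  · simp [pvF]
  · rcases hne with h | h
    · left
      simp [pvU, h]
    · right; exact h

lemma pvMain : ∀ (n : Nat) (cs a : List Char) (cells : List String), cs.length ≤ n →
    '|' ∉ a → '\x00' ∉ cs → (a ≠ [] ∨ cs ≠ [] ∨ cells ≠ []) →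
    pvALoop cs (String.ofList (pvU a)) cells = cells ++ (pvSP (a ++ pvR cs)).map pvF := by
  intro n
  induction n with
  | zero =>
    intro cs a cells h ha hn hne
    have hcs : cs = [] := List.length_eq_zero_iff.mp (Nat.le_zero.mp h)
    subst hcs
    rw [pvR]
    simp only [List.append_nil]
    exact pvBase a cells ha (by tauto)
  | succ n ih =>
    intro cs a cells h ha hn hne
    cases cs with
    | nil =>
      rw [pvR]
      simp only [List.append_nil]
      exact pvBase a cells ha (by tauto)
    | cons c t =>
      by_cases h1 : c = '\\' ∧ t.head? = some '|'
      · obtain ⟨rfl, hh⟩ := h1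
        cases t with
        | nil => simp at hh
        | cons c2 t2 =>
          simp only [List.head?_cons, Option.some.injEq] at hh
          subst hh
          rw [pvALoop, if_pos ⟨rfl, by simp⟩]
          simp only [List.tail_cons]
          rw [pvPush]
          have hx : pvU a ++ ['|'] = pvU (a ++ ['\x00']) := by
            rw [pvU_append]; rfl
          rw [hx]
          rw [ih t2 (a ++ ['\x00']) cells (by simp at h; omega)
              (by simp [ha])
              (by intro hm; exact hn (by simp [hm]))
              (by left; simp)]
          rw [pvR, if_pos ⟨rfl, by simp⟩]
          simp only [List.tail_cons]
          rw [List.append_assoc]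
          rfl
      · by_cases h2 : c = '|'
        · subst h2
          rw [pvALoop, if_neg h1, if_pos rfl]
          have hz : ("" : String) = String.ofList (pvU []) := by simp [pvU]
          rw [hz]
          rw [ih t [] (cells ++ [PySem.Str.strip (String.ofList (pvU a))])
              (by simp at h; omega) (by simp)
              (by intro hm; exact hn (by simp [hm]))
              (by right; right; simp)]
          rw [pvR, if_neg h1]
          rw [pvSP_append a ('|' :: pvR t) ha]
          have hsp : pvSP ('|' :: pvR t) = [] :: pvSP (pvR t) := by
            rw [pvSP, if_pos rfl]
          rw [hsp]
          simp [pvConsHead, pvF]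
        · have hc0 : c ≠ '\x00' := by intro hx; exact hn (by simp [hx])
          rw [pvALoop, if_neg h1, if_neg h2]
          rw [pvPush]
          have hx : pvU a ++ [c] = pvU (a ++ [c]) := by
            rw [pvU_append]
            simp [pvU, hc0]
          rw [hx]
          rw [ih t (a ++ [c]) cells (by simp at h; omega)
              (by simp [ha]; exact fun hx => h2 hx.symm)
              (by intro hm; exact hn (by simp [hm]))
              (by left; simp)]
          rw [pvR, if_neg h1]
          rw [show a ++ c :: pvR t = (a ++ [c]) ++ pvR t from by simp]

-- ===== VERDICT (by name: the statement is the Claim_ definition above) =====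
theorem split_table_row_py_spec : Claim_equal_split_table_row_py := by
  intro row hdom
  unfold Spec_split_table_row_py split_table_row_py split_table_row_py_alt
  have htl : (PySem.Str.slice row (some 1) (some (-1))).toList
      = PySem.List.slice row.toList (some 1) (some (-1)) := by
    simp [PySem.Str.toList_slice]
  have hnul : '\x00' ∉ PySem.List.slice row.toList (some 1) (some (-1)) := by
    intro hm
    have hmem : '\x00' ∈ row.toList := PySem.List.mem_of_mem_slice _ _ _ hm
    have := List.all_eq_true.mp hdom _ hmem
    simp [pvDomChar] at this
  by_cases hc : PySem.Str.slice row (some 1) (some (-1)) = ""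
  · rw [if_pos hc]
    have hl : PySem.List.slice row.toList (some 1) (some (-1)) = [] := by
      rw [← htl, hc]
      rfl
    rw [hl, pvALoop, if_neg]
    simp
  · rw [if_neg hc]
    have hl : PySem.List.slice row.toList (some 1) (some (-1)) ≠ [] := by
      intro hx
      apply hc
      have h0 := congrArg String.ofList (htl.trans hx)
      rw [String.ofList_toList] at h0
      exact h0
    rw [htl, pvR_eq, pvSP_eq]
    have hfun : (fun cell => PySem.Str.strip (String.ofList (PySem.Chars.replace cell ['\x00'] ['|'])))
        = pvF := by
      funext cell
      rw [pvU_eq]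
      rfl
    rw [hfun]
    have hz : ("" : String) = String.ofList (pvU []) := by simp [pvU]
    rw [hz]
    rw [pvMain (PySem.List.slice row.toList (some 1) (some (-1))).length _ [] []
        le_rfl (by simp) hnul (by right; left; exact hl)]
    simp
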